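-- pv_equiv track=rewrite | github.com/cchrewrite/ambm | ambm_ver_0.2.0/src/python/RepSimpLib.py | ComputeVariableConnectionMatrix
-- ===== SOURCE A (Python) =====
-- def ComputeVariableConnectionMatrix(VT):
--     M = []
--     for P in VT:
--         X = []
--         PT = P[1:len(P)]
--         for Q in VT:
--             QT = Q[1:len(Q)]
--             flag = False
--             for U in PT:
--                 if U in QT:
--                     flag = True
--                     break
--             if flag == True:
--                 X.append(True)
--             else:
--                 X.append(False)
--         M.append(X)
--     return M
-- ===== SOURCE B (Python) =====
-- def ComputeVariableConnectionMatrix(VT):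
--     n = len(VT)
--     index = {}
--     for i, P in enumerate(VT):
--         for u in P[1:]:
--             index.setdefault(u, []).append(i)
--     M = [[False] * n for _ in range(n)]
--     for ids in index.values():
--         for i in ids:
--             for j in ids:
--                 M[i][j] = True
--     return M
-- ===== Notes on version B (the rewrite author's own statement) =====
-- stated objective: faster
-- what changed: Replaces the quadruple nested membership scan (for every ordered pair of tuples, scan one tail for an element of the other) by an inverted index from tail elements to tuple indices, then marks True cells of a preallocated n*n False matrix only for index pairs sharing a key.
import Mathlib
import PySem

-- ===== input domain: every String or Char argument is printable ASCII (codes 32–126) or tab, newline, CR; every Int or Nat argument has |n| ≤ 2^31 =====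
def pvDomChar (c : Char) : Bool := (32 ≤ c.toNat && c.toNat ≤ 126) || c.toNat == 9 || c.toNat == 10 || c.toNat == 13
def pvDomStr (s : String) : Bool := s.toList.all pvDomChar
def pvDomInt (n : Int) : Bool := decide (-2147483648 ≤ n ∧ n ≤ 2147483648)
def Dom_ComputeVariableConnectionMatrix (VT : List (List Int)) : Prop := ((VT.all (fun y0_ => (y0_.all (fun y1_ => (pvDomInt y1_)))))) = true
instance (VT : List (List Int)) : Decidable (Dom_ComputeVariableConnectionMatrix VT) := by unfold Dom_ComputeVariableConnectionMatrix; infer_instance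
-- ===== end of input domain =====

-- B replaces A's four nested scans by an inverted index (tail element -> tuple indices)
-- marking the True cells of a preallocated matrix; return value only (neither mutates its argument).

-- ===== PORT A =====
-- the inner 'for U in PT: if U in QT: flag = True; break' loop of A
def pvFlag : List Int → List Int → Bool
  | [], _ => false
  | u :: rest, QT => if QT.contains u then true else pvFlag rest QT

def ComputeVariableConnectionMatrix (VT : List (List Int)) : List (List Bool) :=
  VT.foldl (fun M P =>
    let PT := P.drop 1            -- P[1:len(P)]
    M ++ [VT.foldl (fun X Q =>
      let QT := Q.drop 1          -- Q[1:len(Q)]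
      if pvFlag PT QT = true then X ++ [true] else X ++ [false]) []]) []

-- ===== PORT B =====
-- M[i][j] = True; every index reaching it comes from enumerate, hence is a nonnegative in-range Int
def pvSet2 (M : List (List Bool)) (i j : Int) : List (List Bool) :=
  M.set i.toNat ((M.getD i.toNat []).set j.toNat true)

-- index.setdefault(u, []).append(i)  over  i, P in enumerate(VT), u in P[1:]
def pvIndex (VT : List (List Int)) : PySem.Dict Int (List Int) :=
  (PySem.List.enumerate VT 0).foldl
    (fun d p => (p.2.drop 1).foldl (fun d u => d.modify u [] (fun l => l ++ [p.1])) d)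
    PySem.Dict.empty

def ComputeVariableConnectionMatrix_alt (VT : List (List Int)) : List (List Bool) :=
  let n := VT.length
  let M0 := List.replicate n (List.replicate n false)
  ((pvIndex VT).values).foldl
    (fun M ids => ids.foldl (fun M i => ids.foldl (fun M j => pvSet2 M i j) M) M) M0

-- ===== PRECONDITION & SPEC =====
def Spec_ComputeVariableConnectionMatrix (VT : List (List Int)) (out : List (List Bool)) : Prop := out = ComputeVariableConnectionMatrix_alt VT
instance (VT : List (List Int)) (out : List (List Bool)) : Decidable (Spec_ComputeVariableConnectionMatrix VT out) := by unfold Spec_ComputeVariableConnectionMatrix; infer_instance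

-- ===== CLAIM (what is proved, stated in full; the proofs are below) =====
def Claim_equal_ComputeVariableConnectionMatrix : Prop := ∀ (VT : List (List Int)), Dom_ComputeVariableConnectionMatrix VT → Spec_ComputeVariableConnectionMatrix VT (ComputeVariableConnectionMatrix VT)

-- ===== LEMMAS AND PROOFS =====

-- the common canonical value: entry (a, b) says whether the tails of VT[a] and VT[b] intersect
def pvCanon (VT : List (List Int)) : List (List Bool) :=
  VT.map (fun P => VT.map (fun Q => (P.drop 1).any (fun u => (Q.drop 1).contains u)))

-- ---- A equals the canonical matrix ----
lemma pvFlag_eq_any (PT QT : List Int) : pvFlag PT QT = PT.any (fun u => QT.contains u) := by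
  induction PT with
  | nil => rfl
  | cons u rest ih => by_cases h : QT.contains u <;> simp [pvFlag, ih]

lemma pvRowA (VT : List (List Int)) (PT : List Int) :
    VT.foldl (fun X Q =>
      let QT := Q.drop 1
      if pvFlag PT QT = true then X ++ [true] else X ++ [false]) []
      = VT.map (fun Q => PT.any (fun u => (Q.drop 1).contains u)) := by
  rw [List.foldl_ext (g := fun X Q => X ++ [PT.any (fun u => (Q.drop 1).contains u)])]
  · simpa using PySem.List.foldl_append_singleton_eq_map
      (l := VT) (acc := ([] : List Bool)) (f := fun Q => PT.any (fun u => (Q.drop 1).contains u))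
  · intro X Q _
    dsimp only
    rw [pvFlag_eq_any]
    cases h : PT.any (fun u => (Q.drop 1).contains u) <;> simp

lemma A_eq_canon (VT : List (List Int)) : ComputeVariableConnectionMatrix VT = pvCanon VT := by
  unfold ComputeVariableConnectionMatrix pvCanon
  rw [List.foldl_ext (g := fun M P => M ++ [VT.map (fun Q => (P.drop 1).any (fun u => (Q.drop 1).contains u))])]
  · simpa using PySem.List.foldl_append_singleton_eq_map
      (l := VT) (acc := ([] : List (List Bool)))
      (f := fun P => VT.map (fun Q => (P.drop 1).any (fun u => (Q.drop 1).contains u)))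
  · intro M P _
    dsimp only
    rw [pvRowA]

-- ---- the inverted index, characterised ----
def pvPairs (VT : List (List Int)) : List (Int × Int) :=
  (PySem.List.enumerate VT 0).flatMap (fun p => (p.2.drop 1).map (fun u => (u, p.1)))

lemma pvIndex_eq_flat (VT : List (List Int)) :
    pvIndex VT = (pvPairs VT).foldl (fun d q => d.modify q.1 [] (fun l => l ++ [q.2])) PySem.Dict.empty := by
  unfold pvIndex pvPairs
  generalize PySem.List.enumerate VT 0 = l
  generalize (PySem.Dict.empty : PySem.Dict Int (List Int)) = d
  induction l generalizing d with
  | nil => rfl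
  | cons p rest ih =>
      simp only [List.foldl_cons, List.flatMap_cons, List.foldl_append, List.foldl_map]
      exact ih _

def pvIds (VT : List (List Int)) (u : Int) : List Int :=
  ((pvPairs VT).filter (fun q => q.1 == u)).map (fun q => q.2)

lemma pvIndex_getD (VT : List (List Int)) (u : Int) :
    (pvIndex VT).getD u [] = pvIds VT u := by
  rw [pvIndex_eq_flat]
  simpa [pvIds] using PySem.Dict.getD_foldl_modify_append (l := pvPairs VT)
    (d := (PySem.Dict.empty : PySem.Dict Int (List Int))) (c := u)

lemma mem_pvPairs (VT : List (List Int)) (u i : Int) :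
    (u, i) ∈ pvPairs VT ↔ ∃ (k : Nat) (h : k < VT.length), i = (k : Int) ∧ u ∈ VT[k].drop 1 := by
  unfold pvPairs
  simp only [List.mem_flatMap, List.mem_map, PySem.List.mem_enumerate_iff]
  constructor
  · rintro ⟨p, ⟨k, hk, rfl⟩, v, hv, huv⟩
    obtain ⟨rfl, rfl⟩ : u = v ∧ i = (0 : Int) + k := by
      constructor <;> [exact (Prod.mk.injEq ..).mp huv.symm |>.1; exact (Prod.mk.injEq ..).mp huv.symm |>.2]
    exact ⟨k, hk, by omega, by simpa using hv⟩
  · rintro ⟨k, hk, rfl, hu⟩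
    exact ⟨((0 : Int) + k, VT[k]), ⟨k, hk, rfl⟩, u, by simpa using hu, by simp⟩

lemma mem_pvIds (VT : List (List Int)) (u i : Int) :
    i ∈ pvIds VT u ↔ (u, i) ∈ pvPairs VT := by
  constructor
  · intro h
    simp only [pvIds, List.mem_map, List.mem_filter] at h
    obtain ⟨q, ⟨hq, hq1⟩, hq2⟩ := h
    have : q = (u, i) := by cases q; simp_all
    simpa [this] using hq
  · intro h
    simp only [pvIds, List.mem_map, List.mem_filter]
    exact ⟨(u, i), ⟨h, by simp⟩, rfl⟩

lemma pvIndex_keys_nodup (VT : List (List Int)) : (pvIndex VT).keys.Nodup := by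
  rw [pvIndex_eq_flat]
  exact PySem.Dict.nodup_keys_foldl_modify_key (pvPairs VT) (fun q => q.1) []
    (fun _ q l => l ++ [q.2]) PySem.Dict.empty (by simp)

lemma mem_pvIndex_keys (VT : List (List Int)) (u : Int) :
    u ∈ (pvIndex VT).keys ↔ ∃ i, (u, i) ∈ pvPairs VT := by
  rw [pvIndex_eq_flat,
      PySem.Dict.keys_foldl_modify_key (pvPairs VT) (fun q => q.1) [] (fun _ q l => l ++ [q.2]) PySem.Dict.empty]
  rw [show (PySem.Dict.empty : PySem.Dict Int (List Int)).keys = [] from rfl]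
  rw [PySem.Set.update_nil_left, PySem.Set.mem_ofList]
  simp only [List.mem_map]
  constructor
  · rintro ⟨q, hq, rfl⟩; exact ⟨q.2, by simpa using hq⟩
  · rintro ⟨i, hi⟩; exact ⟨(u, i), hi, rfl⟩

lemma pvIndex_values (VT : List (List Int)) :
    (pvIndex VT).values = (pvIndex VT).keys.map (fun k => (pvIndex VT).getD k []) :=
  PySem.Dict.values_eq_map_keys _ (pvIndex_keys_nodup VT) []

-- ---- the marking folds, characterised entrywise ----
def pvDims (M : List (List Bool)) (n : Nat) : Prop := M.length = n ∧ ∀ r ∈ M, r.length = n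

def pvGetE (M : List (List Bool)) (a b : Nat) : Bool := (M.getD a []).getD b false

def pvBnd (ids : List Int) (n : Nat) : Prop := ∀ x ∈ ids, ∃ k : Nat, x = (k : Int) ∧ k < n

lemma pvDims_set2 {M : List (List Bool)} {n : Nat} (h : pvDims M n) (i j : Int) :
    pvDims (pvSet2 M i j) n := by
  obtain ⟨hl, hr⟩ := h
  refine ⟨by simp [pvSet2, hl], ?_⟩
  intro r hrm
  by_cases hi : i.toNat < M.length
  · rcases List.mem_or_eq_of_mem_set hrm with h' | h'
    · exact hr r h'
    · subst h'
      simp only [List.length_set]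
      exact hr _ ((List.getD_eq_getElem M [] hi) ▸ List.getElem_mem hi)
  · rw [pvSet2, List.set_eq_of_length_le (by omega)] at hrm
    exact hr r hrm

lemma getD_len_of_lt {M : List (List Bool)} {n a : Nat} (hd : pvDims M n) (ha : a < n) :
    (M.getD a []).length = n := by
  obtain ⟨hl, hr⟩ := hd
  have haM : a < M.length := by omega
  exact hr _ ((List.getD_eq_getElem M [] haM) ▸ List.getElem_mem haM)

lemma pvGetE_set2 {M : List (List Bool)} {n : Nat} (hd : pvDims M n)
    {k m a b : Nat} (hk : k < n) (_hm : m < n) (ha : a < n) (hb : b < n) :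
    pvGetE (pvSet2 M (k : Int) (m : Int)) a b = (pvGetE M a b || (decide (a = k) && decide (b = m))) := by
  have hl := hd.1
  have hrow := getD_len_of_lt hd hk
  have hrowa := getD_len_of_lt hd ha
  unfold pvSet2 pvGetE
  simp only [Int.toNat_natCast]
  rw [List.getD_eq_getElem _ [] (by simp; omega)]
  by_cases hak : k = a
  · subst hak
    rw [List.getElem_set_self (by simp; omega)]
    rw [List.getD_eq_getElem _ false (by rw [List.length_set]; omega)]
    rw [List.getElem_set]
    by_cases hbm : m = b
    · simp [hbm]
    · rw [if_neg hbm, List.getD_eq_getElem _ false (by omega)]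
      have : decide (b = m) = false := by simp [eq_comm, hbm]
      simp [this]
  · rw [List.getElem_set_ne hak, ← List.getD_eq_getElem _ [] (by omega)]
    have : decide (a = k) = false := by simp [eq_comm, hak]
    simp [this]

lemma pvDims_foldl {α : Type} {n : Nat} (f : List (List Bool) → α → List (List Bool))
    (hf : ∀ M x, pvDims M n → pvDims (f M x) n) (l : List α) {M : List (List Bool)}
    (h : pvDims M n) : pvDims (l.foldl f M) n := by
  induction l generalizing M with
  | nil => exact h
  | cons x rest ih => exact ih (hf M x h)

lemma pvGetE_inner2 {n : Nat} (ids2 : List Int) {M : List (List Bool)} (hd : pvDims M n)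
    {k a b : Nat} (hk : k < n) (hbnd : pvBnd ids2 n) (ha : a < n) (hb : b < n) :
    pvGetE (ids2.foldl (fun M j => pvSet2 M (k : Int) j) M) a b
      = (pvGetE M a b || (decide (a = k) && ids2.contains (b : Int))) := by
  induction ids2 generalizing M with
  | nil => simp
  | cons j rest ih =>
      obtain ⟨m, rfl, hm⟩ := hbnd j (by simp)
      rw [List.foldl_cons, ih (pvDims_set2 hd _ _) (fun x hx => hbnd x (by simp [hx]))]
      rw [pvGetE_set2 hd hk hm ha hb]
      have : (((m : Nat) : Int) :: rest).contains (b : Int)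
          = (decide (b = m) || rest.contains (b : Int)) := by simp
      rw [this]
      cases pvGetE M a b <;> cases hab : decide (a = k) <;>
        cases hbm : decide (b = m) <;> simp_all

lemma pvGetE_inner1 {n : Nat} (ids l : List Int) {M : List (List Bool)} (hd : pvDims M n)
    (hbnd : pvBnd ids n) (hbndl : pvBnd l n) {a b : Nat} (ha : a < n) (hb : b < n) :
    pvGetE (l.foldl (fun M i => ids.foldl (fun M j => pvSet2 M i j) M) M) a b
      = (pvGetE M a b || (l.contains (a : Int) && ids.contains (b : Int))) := by
  induction l generalizing M with
  | nil => simp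
  | cons i rest ih =>
      obtain ⟨k, rfl, hk⟩ := hbndl i (by simp)
      rw [List.foldl_cons,
        ih (pvDims_foldl _ (fun M x h => pvDims_set2 h _ _) ids hd) (fun x hx => hbndl x (by simp [hx]))]
      rw [pvGetE_inner2 ids hd hk hbnd ha hb]
      have : (((k : Nat) : Int) :: rest).contains (a : Int)
          = (decide (a = k) || rest.contains (a : Int)) := by simp
      rw [this]
      cases pvGetE M a b <;> cases hak : decide (a = k) <;> simp_all

lemma pvGetE_outer {n : Nat} (vals : List (List Int)) {M : List (List Bool)} (hd : pvDims M n)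
    (hbnd : ∀ ids ∈ vals, pvBnd ids n) {a b : Nat} (ha : a < n) (hb : b < n) :
    pvGetE (vals.foldl (fun M ids => ids.foldl (fun M i => ids.foldl (fun M j => pvSet2 M i j) M) M) M) a b
      = (pvGetE M a b || vals.any (fun ids => ids.contains (a : Int) && ids.contains (b : Int))) := by
  induction vals generalizing M with
  | nil => simp
  | cons ids rest ih =>
      have hdims : pvDims (ids.foldl (fun M i => ids.foldl (fun M j => pvSet2 M i j) M) M) n :=
        pvDims_foldl _ (fun M x h => pvDims_foldl _ (fun M y h' => pvDims_set2 h' _ _) ids h) ids hd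
      rw [List.foldl_cons, ih hdims (fun x hx => hbnd x (by simp [hx]))]
      rw [pvGetE_inner1 ids ids hd (hbnd ids (by simp)) (hbnd ids (by simp)) ha hb]
      cases pvGetE M a b <;> simp

lemma pvGetE_M0 {n a b : Nat} (ha : a < n) (hb : b < n) :
    pvGetE (List.replicate n (List.replicate n false)) a b = false := by
  rw [pvGetE, List.getD_eq_getElem _ [] (by simpa using ha), List.getElem_replicate,
      List.getD_eq_getElem _ false (by simpa using hb), List.getElem_replicate]

lemma pvDims_M0 (n : Nat) : pvDims (List.replicate n (List.replicate n false)) n :=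
  ⟨by simp, fun r hr => by simp [List.eq_of_mem_replicate hr]⟩

lemma pvBnd_values (VT : List (List Int)) {ids : List Int}
    (h : ids ∈ (pvIndex VT).values) : pvBnd ids VT.length := by
  rw [pvIndex_values, List.mem_map] at h
  obtain ⟨u, _, rfl⟩ := h
  intro x hx
  rw [pvIndex_getD, mem_pvIds, mem_pvPairs] at hx
  obtain ⟨k, hk, rfl, _⟩ := hx
  exact ⟨k, rfl, hk⟩

lemma pvDims_B (VT : List (List Int)) : pvDims (ComputeVariableConnectionMatrix_alt VT) VT.length := by
  unfold ComputeVariableConnectionMatrix_alt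
  exact pvDims_foldl _
    (fun M ids h => pvDims_foldl _ (fun M x h' => pvDims_foldl _ (fun M y h'' => pvDims_set2 h'' _ _) ids h') ids h)
    _ (pvDims_M0 _)

lemma B_entry (VT : List (List Int)) {a b : Nat} (ha : a < VT.length) (hb : b < VT.length) :
    pvGetE (ComputeVariableConnectionMatrix_alt VT) a b
      = ((pvIndex VT).values).any (fun ids => ids.contains (a : Int) && ids.contains (b : Int)) := by
  unfold ComputeVariableConnectionMatrix_alt
  rw [pvGetE_outer (n := VT.length) _ (pvDims_M0 _) (fun ids h => pvBnd_values VT h) ha hb,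
      pvGetE_M0 ha hb]
  simp

lemma any_values_iff (VT : List (List Int)) {a b : Nat} (ha : a < VT.length) (hb : b < VT.length) :
    (((pvIndex VT).values).any (fun ids => ids.contains (a : Int) && ids.contains (b : Int)) = true)
      ↔ ∃ u, u ∈ VT[a].drop 1 ∧ u ∈ VT[b].drop 1 := by
  simp only [List.any_eq_true, Bool.and_eq_true, List.contains_iff_mem]
  constructor
  · rintro ⟨ids, hids, hia, hib⟩
    rw [pvIndex_values, List.mem_map] at hids
    obtain ⟨u, _, rfl⟩ := hids
    rw [pvIndex_getD, mem_pvIds, mem_pvPairs] at hia hib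
    obtain ⟨k, hk, hka, hua⟩ := hia
    obtain ⟨k', hk', hkb, hub⟩ := hib
    obtain rfl : k = a := by exact_mod_cast hka.symm
    obtain rfl : k' = b := by exact_mod_cast hkb.symm
    exact ⟨u, hua, hub⟩
  · rintro ⟨u, hua, hub⟩
    have hpa : (u, (a : Int)) ∈ pvPairs VT := (mem_pvPairs VT u a).mpr ⟨a, ha, rfl, hua⟩
    have hpb : (u, (b : Int)) ∈ pvPairs VT := (mem_pvPairs VT u b).mpr ⟨b, hb, rfl, hub⟩
    refine ⟨(pvIndex VT).getD u [], ?_, ?_, ?_⟩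
    · rw [pvIndex_values, List.mem_map]
      exact ⟨u, (mem_pvIndex_keys VT u).mpr ⟨(a : Int), hpa⟩, rfl⟩
    · rw [pvIndex_getD, mem_pvIds]; exact hpa
    · rw [pvIndex_getD, mem_pvIds]; exact hpb

lemma B_eq_canon (VT : List (List Int)) : ComputeVariableConnectionMatrix_alt VT = pvCanon VT := by
  have hdB := pvDims_B VT
  apply List.ext_getElem (by simp [hdB.1, pvCanon])
  intro a ha ha'
  have han : a < VT.length := hdB.1 ▸ ha
  have hrowB : (ComputeVariableConnectionMatrix_alt VT)[a] = (ComputeVariableConnectionMatrix_alt VT).getD a [] :=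
    (List.getD_eq_getElem _ [] ha).symm
  apply List.ext_getElem
  · rw [hrowB]
    rw [getD_len_of_lt hdB han]
    simp [pvCanon]
  · intro b hb hb'
    have hbn : b < VT.length := by
      have := getD_len_of_lt hdB han
      rw [hrowB, this] at hb
      exact hb
    have hentry : (ComputeVariableConnectionMatrix_alt VT)[a][b] = pvGetE (ComputeVariableConnectionMatrix_alt VT) a b := by
      rw [pvGetE, ← hrowB, List.getD_eq_getElem _ false (by rw [hrowB, getD_len_of_lt hdB han]; exact hbn)]
    rw [hentry, B_entry VT han hbn]
    have hcanon : (pvCanon VT)[a][b] = (VT[a].drop 1).any (fun u => (VT[b].drop 1).contains u) := by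
      simp [pvCanon]
    rw [hcanon, Bool.eq_iff_iff]
    rw [any_values_iff VT han hbn, List.any_eq_true]
    constructor
    · rintro ⟨u, h1, h2⟩; exact ⟨u, h1, by simpa using h2⟩
    · rintro ⟨u, h1, h2⟩; exact ⟨u, h1, by simpa using h2⟩

-- ===== VERDICT (by name: the statement is the Claim_ definition above) =====
theorem ComputeVariableConnectionMatrix_spec : Claim_equal_ComputeVariableConnectionMatrix := by
  intro VT _
  unfold Spec_ComputeVariableConnectionMatrix
  rw [A_eq_canon, B_eq_canon]
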